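-- pv_equiv track=rewrite | github.com/Pavan-r-m/ecommerce-session-recsys | src/features/feature_builder.py | _get_popularity_rank
-- ===== SOURCE A (Python) =====
-- from typing import List, Dict, Optional
--
-- def _get_popularity_rank(item_id: str, popularity_dict: Dict[str, int]) -> int:
--     """Get rank of item by popularity"""
--     sorted_items = sorted(
--         popularity_dict.items(),
--         key=lambda x: x[1],
--         reverse=True
--     )
--     for rank, (iid, _) in enumerate(sorted_items, start=1):
--         if iid == item_id:
--             return rank
--     return len(sorted_items) + 1
-- ===== SOURCE B (Python) =====
-- def _get_popularity_rank(item_id: str, popularity_dict: dict) -> int: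
--     """Get rank of item by popularity (single pass, no sorting)."""
--     target = popularity_dict.get(item_id)
--     if target is None:
--         return len(popularity_dict) + 1
--     rank = 1
--     seen = False
--     for iid, pop in popularity_dict.items():
--         if iid == item_id:
--             seen = True
--         elif pop > target or (pop == target and not seen):
--             rank += 1
--     return rank
-- ===== Notes on version B (the rewrite author's own statement) =====
-- stated objective: faster
-- what changed: B replaces A's full O(n log n) sort-then-scan with a single O(n) counting pass: the rank is 1 + (#items with strictly greater popularity) + (#earlier items with equal popularity), which reproduces the stable descending sort's tie-breaking without sorting.
import Mathlib
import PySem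

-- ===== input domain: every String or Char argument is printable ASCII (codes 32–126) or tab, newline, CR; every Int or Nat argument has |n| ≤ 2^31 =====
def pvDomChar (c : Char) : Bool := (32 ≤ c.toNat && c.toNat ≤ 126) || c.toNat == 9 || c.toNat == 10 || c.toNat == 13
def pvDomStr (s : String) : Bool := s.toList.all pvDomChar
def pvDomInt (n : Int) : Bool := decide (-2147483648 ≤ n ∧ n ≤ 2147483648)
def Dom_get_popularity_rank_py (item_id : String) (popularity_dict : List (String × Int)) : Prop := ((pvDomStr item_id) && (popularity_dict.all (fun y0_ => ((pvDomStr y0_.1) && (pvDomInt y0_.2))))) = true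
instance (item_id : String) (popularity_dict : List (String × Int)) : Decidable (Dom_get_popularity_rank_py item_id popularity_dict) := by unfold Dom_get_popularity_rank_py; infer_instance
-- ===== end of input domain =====

-- B computes the rank in a single counting pass instead of A's sort-then-scan (measured faster; asymptotic change).

-- ===== PORT A =====
-- the 'for rank, (iid, _) in enumerate(sorted_items, start=1): if iid == item_id: return rank' loop
def pvFindA (item_id : String) : List (String × Int) → Int → Option Int
  | [], _ => none
  | (iid, _) :: rest, rank =>
    if iid == item_id then some rank else pvFindA item_id rest (rank + 1)

def get_popularity_rank_py (item_id : String) (popularity_dict : List (String × Int)) : Int :=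
  let sorted_items := PySem.List.sorted popularity_dict (fun x => x.2) true
  match pvFindA item_id sorted_items 1 with
  | some rank => rank
  | none => (sorted_items.length : Int) + 1

-- ===== PORT B =====
-- B's single loop: count items ranked strictly before item_id (greater popularity, or equal popularity seen before it)
def pvLoopB (item_id : String) (target : Int) : List (String × Int) → Int → Bool → Int
  | [], rank, _ => rank
  | (iid, pop) :: rest, rank, seen =>
    if iid == item_id then pvLoopB item_id target rest rank true
    else if target < pop ∨ (pop = target ∧ seen = false) then pvLoopB item_id target rest (rank + 1) seen
    else pvLoopB item_id target rest rank seen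

def get_popularity_rank_py_alt (item_id : String) (popularity_dict : List (String × Int)) : Int :=
  match (PySem.Dict.mk popularity_dict).get? item_id with
  | none => (popularity_dict.length : Int) + 1
  | some target => pvLoopB item_id target popularity_dict 1 false

-- ===== PRECONDITION & SPEC =====
-- Pre_ states the invariant of the assoc-list representation of a Python dict (keys are unique);
-- it excludes no input the Python function can receive, since a Python dict cannot hold duplicate keys.
def Pre_get_popularity_rank_py (item_id : String) (popularity_dict : List (String × Int)) : Prop :=
  (popularity_dict.map Prod.fst).Nodup
instance (item_id : String) (popularity_dict : List (String × Int)) : Decidable (Pre_get_popularity_rank_py item_id popularity_dict) := by unfold Pre_get_popularity_rank_py; infer_instance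

def pvWitness_get_popularity_rank_py : String × (List (String × Int)) := ("a", [("a", 3), ("b", 5)])

def Spec_get_popularity_rank_py (item_id : String) (popularity_dict : List (String × Int)) (out : Int) : Prop := out = get_popularity_rank_py_alt item_id popularity_dict
instance (item_id : String) (popularity_dict : List (String × Int)) (out : Int) : Decidable (Spec_get_popularity_rank_py item_id popularity_dict out) := by unfold Spec_get_popularity_rank_py; infer_instance

-- ===== CLAIM (what is proved, stated in full; the proofs are below) =====
def Claim_equal_get_popularity_rank_py : Prop := ∀ (item_id : String) (popularity_dict : List (String × Int)), Dom_get_popularity_rank_py item_id popularity_dict → Pre_get_popularity_rank_py item_id popularity_dict → Spec_get_popularity_rank_py item_id popularity_dict (get_popularity_rank_py item_id popularity_dict)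

-- ===== LEMMAS AND PROOFS =====

-- the comparator the reverse sort of A uses, and one step of its insertion-sort fold
def pvB : (String × Int) → (String × Int) → Bool := fun a b => decide (b.2 < a.2)
def pvStep : List (String × Int) → (String × Int) → List (String × Int) :=
  fun acc x => PySem.List.insertBy pvB x acc

lemma pvSortedEq (pd : List (String × Int)) :
    PySem.List.sorted pd (fun x => x.2) true = pd.foldl pvStep [] := rfl

-- inserting z strictly more popular than m lands somewhere before m
lemma pvInsert_promote (z m : String × Int) (v : List (String × Int)) :
    ∀ u : List (String × Int), m.2 < z.2 →
    ∃ u1 u2, PySem.List.insertBy pvB z (u ++ m :: v) = (u1 ++ z :: u2) ++ m :: v ∧ u1 ++ u2 = u := by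
  intro u
  induction u with
  | nil =>
    intro h
    refine ⟨[], [], ?_, rfl⟩
    simp [PySem.List.insertBy, pvB, h]
  | cons y u ih =>
    intro h
    by_cases hy : y.2 < z.2
    · refine ⟨[], y :: u, ?_, rfl⟩
      simp [PySem.List.insertBy, pvB, hy]
    · obtain ⟨u1, u2, heq, hcat⟩ := ih h
      refine ⟨y :: u1, u2, ?_, by simp [hcat]⟩
      simp [PySem.List.insertBy, pvB, hy, heq]

-- inserting z no more popular than everything up to and including m leaves the prefix alone
lemma pvInsert_skip (z m : String × Int) (v : List (String × Int)) :
    ∀ u : List (String × Int), (∀ y ∈ u, z.2 ≤ y.2) → z.2 ≤ m.2 →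
    PySem.List.insertBy pvB z (u ++ m :: v) = u ++ m :: PySem.List.insertBy pvB z v := by
  intro u
  induction u with
  | nil =>
    intro _ hm
    simp [PySem.List.insertBy, pvB, not_lt.mpr hm]
  | cons y u ih =>
    intro hu hm
    have hy : z.2 ≤ y.2 := hu y (by simp)
    simp [PySem.List.insertBy, pvB, not_lt.mpr hy, ih (fun y hy' => hu y (by simp [hy'])) hm]

-- inserting z into a descending-sorted list places it after exactly the elements with key ≥ z.2
lemma pvInsert_sorted (z : String × Int) :
    ∀ acc : List (String × Int), acc.Pairwise (fun a b => b.2 ≤ a.2) →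
    ∃ u v, PySem.List.insertBy pvB z acc = u ++ z :: v ∧ u ++ v = acc ∧
      (∀ y ∈ u, z.2 ≤ y.2) ∧ u.length = acc.countP (fun y => decide (z.2 ≤ y.2)) := by
  intro acc
  induction acc with
  | nil => intro _; exact ⟨[], [], rfl, rfl, by simp, by simp⟩
  | cons y acc ih =>
    intro hp
    rw [List.pairwise_cons] at hp
    obtain ⟨h1, h2⟩ := hp
    by_cases hy : y.2 < z.2
    · refine ⟨[], y :: acc, ?_, rfl, by simp, ?_⟩
      · simp [PySem.List.insertBy, pvB, hy]
      · have : ∀ w ∈ y :: acc, ¬ (decide (z.2 ≤ w.2) = true) := by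
          intro w hw
          rcases List.mem_cons.mp hw with h | h
          · subst h; simp; omega
          · have := h1 w h; simp; omega
        simp [List.countP_eq_zero.mpr this]
    · obtain ⟨u, v, heq, hcat, hge, hlen⟩ := ih h2
      refine ⟨y :: u, v, ?_, by simp [hcat], ?_, ?_⟩
      · simp [PySem.List.insertBy, pvB, hy, heq]
      · intro w hw
        rcases List.mem_cons.mp hw with h | h
        · subst h; omega
        · exact hge w h
      · simp [hlen, not_lt.mp hy]

-- folding the remaining items over a state u ++ e :: v keeps e in place and grows u by the strictly-greater items
lemma pvFold_keep (item : String) (t : Int) :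
    ∀ (σ u v : List (String × Int)), (∀ y ∈ u, t ≤ y.2) →
    ∃ u' v', σ.foldl pvStep (u ++ (item, t) :: v) = u' ++ (item, t) :: v' ∧
      (∀ y ∈ u', y ∈ u ∨ y ∈ σ) ∧
      u'.length = u.length + σ.countP (fun y => decide (t < y.2)) := by
  intro σ
  induction σ with
  | nil =>
    intro u v hu
    exact ⟨u, v, rfl, fun y hy => Or.inl hy, by simp⟩
  | cons z σ ih =>
    intro u v hu
    rw [List.foldl_cons]
    by_cases hz : t < z.2
    · obtain ⟨u1, u2, heq, hcat⟩ := pvInsert_promote z (item, t) v u hz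
      have hu' : ∀ y ∈ u1 ++ z :: u2, t ≤ y.2 := by
        intro y hy
        rcases List.mem_append.mp hy with h | h
        · exact hu y (hcat ▸ List.mem_append.mpr (Or.inl h))
        · rcases List.mem_cons.mp h with h | h
          · subst h; omega
          · exact hu y (hcat ▸ List.mem_append.mpr (Or.inr h))
      obtain ⟨u', v', heq', hmem, hlen⟩ := ih (u1 ++ z :: u2) v hu'
      refine ⟨u', v', ?_, ?_, ?_⟩
      · show σ.foldl pvStep (pvStep (u ++ (item, t) :: v) z) = _
        rw [show pvStep (u ++ (item, t) :: v) z = (u1 ++ z :: u2) ++ (item, t) :: v from heq, heq']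
      · intro y hy
        rcases hmem y hy with h | h
        · rcases List.mem_append.mp h with h' | h'
          · exact Or.inl (hcat ▸ List.mem_append.mpr (Or.inl h'))
          · rcases List.mem_cons.mp h' with h'' | h''
            · subst h''; exact Or.inr (by simp)
            · exact Or.inl (hcat ▸ List.mem_append.mpr (Or.inr h''))
        · exact Or.inr (by simp [h])
      · have hl : (u1 ++ z :: u2).length = u.length + 1 := by
          have := congrArg List.length hcat
          simp at this ⊢
          omega
        have hc : (z :: σ).countP (fun y => decide (t < y.2)) =
            σ.countP (fun y => decide (t < y.2)) + 1 := by
          simp [hz]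
        rw [hlen, hl, hc]
        omega
    · have hskip := pvInsert_skip z (item, t) v u
        (fun y hy => le_trans (not_lt.mp hz) (hu y hy)) (not_lt.mp hz)
      obtain ⟨u', v', heq', hmem, hlen⟩ := ih u (PySem.List.insertBy pvB z v) hu
      refine ⟨u', v', ?_, ?_, ?_⟩
      · show σ.foldl pvStep (pvStep (u ++ (item, t) :: v) z) = _
        rw [show pvStep (u ++ (item, t) :: v) z = u ++ (item, t) :: PySem.List.insertBy pvB z v from hskip, heq']
      · intro y hy
        rcases hmem y hy with h | h
        · exact Or.inl h
        · exact Or.inr (by simp [h])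
      · have hc : (z :: σ).countP (fun y => decide (t < y.2)) =
            σ.countP (fun y => decide (t < y.2)) := by
          simp [hz]
        rw [hlen, hc]

-- A's scan of the sorted list: the unique key match sits right after the u-prefix
lemma pvFindA_prefix (item : String) (t : Int) (v : List (String × Int)) :
    ∀ (u : List (String × Int)) (r : Int), (∀ y ∈ u, y.1 ≠ item) →
    pvFindA item (u ++ (item, t) :: v) r = some (r + (u.length : Int)) := by
  intro u
  induction u with
  | nil => intro r _; simp [pvFindA]
  | cons y u ih =>
    intro r hu
    obtain ⟨a, b⟩ := y
    have ha : (a == item) = false := by simpa using hu (a, b) (by simp)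
    simp only [List.cons_append, pvFindA, ha, Bool.false_eq_true, if_false]
    rw [ih (r + 1) (fun y hy' => hu y (by simp [hy']))]
    congr 1
    simp only [List.length_cons]
    push_cast
    ring

lemma pvFindA_none (item : String) :
    ∀ (s : List (String × Int)) (r : Int), (∀ y ∈ s, y.1 ≠ item) → pvFindA item s r = none := by
  intro s
  induction s with
  | nil => intro r _; rfl
  | cons y s ih =>
    intro r hs
    obtain ⟨a, b⟩ := y
    have ha : a ≠ item := hs (a, b) (by simp)
    simp only [pvFindA]
    rw [if_neg (by simpa using ha)]
    exact ih _ (fun y hy => hs y (by simp [hy]))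

-- B's loop after the item was seen: counts strictly greater items
lemma pvLoopB_after (item : String) (t : Int) :
    ∀ (σ : List (String × Int)) (r : Int), (∀ y ∈ σ, y.1 ≠ item) →
    pvLoopB item t σ r true = r + (σ.countP (fun y => decide (t < y.2)) : Int) := by
  intro σ
  induction σ with
  | nil => intro r _; simp [pvLoopB]
  | cons y σ ih =>
    intro r hs
    obtain ⟨a, b⟩ := y
    have ha : (a == item) = false := by simpa using hs (a, b) (by simp)
    have hrest : ∀ y ∈ σ, y.1 ≠ item := fun y hy => hs y (by simp [hy])
    by_cases hb : t < b
    · have hc : ((a, b) :: σ).countP (fun y => decide (t < y.2)) =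
          σ.countP (fun y => decide (t < y.2)) + 1 := by
        simp [hb]
      rw [hc]
      simp only [pvLoopB, ha, Bool.false_eq_true, if_false]
      rw [if_pos (Or.inl hb), ih (r + 1) hrest]
      push_cast
      ring
    · have hc : ((a, b) :: σ).countP (fun y => decide (t < y.2)) =
          σ.countP (fun y => decide (t < y.2)) := by
        simp [hb]
      rw [hc]
      simp only [pvLoopB, ha, Bool.false_eq_true, if_false]
      rw [if_neg (by simp [hb]), ih r hrest]

-- B's loop before the item: counts greater-or-equal items, then switches to the after-phase
lemma pvLoopB_before (item : String) (t : Int) (σ : List (String × Int)) (hσ : ∀ y ∈ σ, y.1 ≠ item) :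
    ∀ (π : List (String × Int)) (r : Int), (∀ y ∈ π, y.1 ≠ item) →
    pvLoopB item t (π ++ (item, t) :: σ) r false =
      r + (π.countP (fun y => decide (t ≤ y.2)) : Int) + (σ.countP (fun y => decide (t < y.2)) : Int) := by
  intro π
  induction π with
  | nil =>
    intro r _
    simp only [List.nil_append, pvLoopB, beq_self_eq_true, if_true]
    rw [pvLoopB_after item t σ r hσ]
    simp
  | cons y π ih =>
    intro r hp
    obtain ⟨a, b⟩ := y
    have ha : (a == item) = false := by simpa using hp (a, b) (by simp)
    have hrest : ∀ y ∈ π, y.1 ≠ item := fun y hy => hp y (by simp [hy])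
    by_cases hb : t ≤ b
    · have hc : ((a, b) :: π).countP (fun y => decide (t ≤ y.2)) =
          π.countP (fun y => decide (t ≤ y.2)) + 1 := by
        simp [hb]
      rw [List.cons_append, hc]
      simp only [pvLoopB, ha, Bool.false_eq_true, if_false]
      rw [if_pos (by rcases eq_or_lt_of_le hb with h | h
                     · exact Or.inr ⟨h.symm, by trivial⟩
                     · exact Or.inl h),
          ih (r + 1) hrest]
      push_cast
      ring
    · have hc : ((a, b) :: π).countP (fun y => decide (t ≤ y.2)) =
          π.countP (fun y => decide (t ≤ y.2)) := by
        simp [hb]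
      rw [List.cons_append, hc]
      simp only [pvLoopB, ha, Bool.false_eq_true, if_false]
      rw [if_neg (by simp; omega), ih r hrest]

-- dict lookup of the first (unique) occurrence
lemma pvGet_first (item : String) (t : Int) (σ : List (String × Int)) :
    ∀ π : List (String × Int), (∀ y ∈ π, y.1 ≠ item) →
    (PySem.Dict.mk (π ++ (item, t) :: σ)).get? item = some t := by
  intro π
  induction π with
  | nil => simp [PySem.Dict.get?_mk_cons]
  | cons y π ih =>
    intro hp
    obtain ⟨a, b⟩ := y
    have ha : (a == item) = false := by simpa using hp (a, b) (by simp)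
    rw [List.cons_append, PySem.Dict.get?_mk_cons, if_neg (by simp [ha])]
    exact ih (fun y hy => hp y (by simp [hy]))

lemma pvGet_none (item : String) (pd : List (String × Int)) (h : ∀ y ∈ pd, y.1 ≠ item) :
    (PySem.Dict.mk pd).get? item = none := by
  induction pd with
  | nil => rfl
  | cons y pd ih =>
    obtain ⟨a, b⟩ := y
    have ha : (a == item) = false := by simpa using h (a, b) (by simp)
    rw [PySem.Dict.get?_mk_cons, if_neg (by simp [ha])]
    exact ih (fun y hy => h y (by simp [hy]))

-- split a list at the first occurrence of the key
lemma pvSplitFirst (item : String) :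
    ∀ pd : List (String × Int), item ∈ pd.map Prod.fst →
    ∃ π t σ, pd = π ++ (item, t) :: σ ∧ ∀ y ∈ π, y.1 ≠ item := by
  intro pd
  induction pd with
  | nil => intro h; simp at h
  | cons y pd ih =>
    intro h
    obtain ⟨a, b⟩ := y
    by_cases ha : a = item
    · subst ha
      exact ⟨[], b, pd, rfl, by simp⟩
    · have hpd : item ∈ pd.map Prod.fst := by
        rcases List.mem_map.mp h with ⟨p, hp, hfst⟩
        rcases List.mem_cons.mp hp with h' | h'
        · subst h'; exact absurd hfst ha
        · exact List.mem_map.mpr ⟨p, h', hfst⟩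
      obtain ⟨π, t, σ, heq, hπ⟩ := ih hpd
      refine ⟨(a, b) :: π, t, σ, by rw [heq, List.cons_append], ?_⟩
      intro y hy
      rcases List.mem_cons.mp hy with h' | h'
      · subst h'; exact ha
      · exact hπ y h'

-- value of A on a first-occurrence split with unique key
lemma pvA_present (item : String) (t : Int) (π σ : List (String × Int))
    (hπ : ∀ y ∈ π, y.1 ≠ item) (hσ : ∀ y ∈ σ, y.1 ≠ item) :
    get_popularity_rank_py item (π ++ (item, t) :: σ) =
      1 + (π.countP (fun y => decide (t ≤ y.2)) : Int) + (σ.countP (fun y => decide (t < y.2)) : Int) := by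
  have hsorted : PySem.List.sorted (π ++ (item, t) :: σ) (fun x => x.2) true =
      σ.foldl pvStep (pvStep (π.foldl pvStep []) (item, t)) := by
    rw [pvSortedEq, List.foldl_append, List.foldl_cons]
  have hπsorted : π.foldl pvStep [] = PySem.List.sorted π (fun x => x.2) true := (pvSortedEq π).symm
  have hpair : (π.foldl pvStep []).Pairwise (fun a b : String × Int => b.2 ≤ a.2) := by
    rw [hπsorted]
    exact PySem.List.sorted_pairwise_rev π (fun x => x.2)
  obtain ⟨u, v, heq, hcat, hge, hlen⟩ := pvInsert_sorted (item, t) (π.foldl pvStep []) hpair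
  obtain ⟨u', v', heq', hmem, hlen'⟩ := pvFold_keep item t σ u v (by simpa using hge)
  have hcount : u.length = π.countP (fun y => decide (t ≤ y.2)) := by
    rw [hlen]
    have hperm : (π.foldl pvStep []).Perm π := by
      rw [hπsorted]; exact PySem.List.sorted_perm π (fun x => x.2) true
    simpa using hperm.countP_eq _
  have humem : ∀ y ∈ u, y ∈ π := by
    intro y hy
    have hmem' : y ∈ π.foldl pvStep [] := hcat ▸ List.mem_append.mpr (Or.inl hy)
    rw [hπsorted] at hmem'
    exact (PySem.List.mem_sorted π (fun x => x.2) true y).mp hmem'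
  have hu'key : ∀ y ∈ u', y.1 ≠ item := by
    intro y hy
    rcases hmem y hy with h | h
    · exact hπ y (humem y h)
    · exact hσ y h
  have hstep : pvStep (π.foldl pvStep []) (item, t) = u ++ (item, t) :: v := heq
  show (match pvFindA item (PySem.List.sorted (π ++ (item, t) :: σ) (fun x => x.2) true) 1 with
        | some rank => rank
        | none => ((PySem.List.sorted (π ++ (item, t) :: σ) (fun x => x.2) true).length : Int) + 1) = _
  rw [hsorted, hstep, heq', pvFindA_prefix item t v' u' 1 hu'key]
  show (1 : Int) + (u'.length : Int) = _
  rw [hlen', hcount]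
  push_cast
  ring

-- ===== VERDICT (by name: the statement is the Claim_ definition above) =====
theorem get_popularity_rank_py_spec : Claim_equal_get_popularity_rank_py := by
  intro item pd _ hpre
  unfold Spec_get_popularity_rank_py
  by_cases hmem : item ∈ pd.map Prod.fst
  · obtain ⟨π, t, σ, heq, hπ⟩ := pvSplitFirst item pd hmem
    subst heq
    have hσ : ∀ y ∈ σ, y.1 ≠ item := by
      unfold Pre_get_popularity_rank_py at hpre
      rw [List.map_append, List.map_cons] at hpre
      have hn := (List.nodup_append.mp hpre).2.1
      rw [List.nodup_cons] at hn
      intro y hy hkey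
      exact hn.1 (List.mem_map.mpr ⟨y, hy, hkey⟩)
    rw [pvA_present item t π σ hπ hσ]
    have hBv : get_popularity_rank_py_alt item (π ++ (item, t) :: σ) =
        1 + (π.countP (fun y => decide (t ≤ y.2)) : Int) + (σ.countP (fun y => decide (t < y.2)) : Int) := by
      unfold get_popularity_rank_py_alt
      rw [pvGet_first item t σ π hπ]
      show pvLoopB item t (π ++ (item, t) :: σ) 1 false = _
      rw [pvLoopB_before item t σ hσ π 1 hπ]
    rw [hBv]
  · have hkeys : ∀ y ∈ pd, y.1 ≠ item := by
      intro y hy hkey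
      exact hmem (List.mem_map.mpr ⟨y, hy, hkey⟩)
    have hA : get_popularity_rank_py item pd = (pd.length : Int) + 1 := by
      have hall : ∀ y ∈ PySem.List.sorted pd (fun x => x.2) true, y.1 ≠ item := by
        intro y hy
        exact hkeys y ((PySem.List.mem_sorted pd (fun x => x.2) true y).mp hy)
      show (match pvFindA item (PySem.List.sorted pd (fun x => x.2) true) 1 with
            | some rank => rank
            | none => ((PySem.List.sorted pd (fun x => x.2) true).length : Int) + 1) = _
      rw [pvFindA_none item _ 1 hall]
      show ((PySem.List.sorted pd (fun x => x.2) true).length : Int) + 1 = _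
      rw [PySem.List.length_sorted]
    have hB : get_popularity_rank_py_alt item pd = (pd.length : Int) + 1 := by
      unfold get_popularity_rank_py_alt
      rw [pvGet_none item pd hkeys]
    rw [hA, hB]
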